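-- pv_equiv track=rewrite | github.com/yungommi/algorithm | programmers/42895.py | solution
-- ===== SOURCE A (Python) =====
-- def solution(N, number):
--     made = [set() for x in range(9)]
--     if number == N:
--         return 1
--     made[1].add(N)
--     for i in range(2,9): # i = 4
--         made[i].add(int(str(N)*i))
--         for m in range(1,i): # m : 1 2 3
--             for x in made[m]: # x : 1 2 3
--                 for y in made[i-m]: # y : 3 2 1
--                     made[i].add(x+y)
--                     made[i].add(x-y)
--                     made[i].add(x*y)
--                     if y != 0 :
--                         made[i].add(x//y)
--         if number in made[i]:
--             return i
--     return -1
-- ===== SOURCE B (Python) =====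
-- def solution(N, number):
--     # Top-down: reach(c) = the set of values expressible with exactly c copies of N.
--     memo = {}
--
--     def reach(c):
--         if c == 1:
--             return {N}
--         if c in memo:
--             return memo[c]
--         vals = {int(str(N) * c)}
--         for m in range(1, c):
--             left, right = reach(m), reach(c - m)
--             vals |= {op for x in left for y in right for op in (x + y, x - y, x * y)}
--             vals |= {x // y for x in left for y in right if y}
--         memo[c] = vals
--         return vals
--
--     if number == N:
--         return 1
--     return next((c for c in range(2, 9) if number in reach(c)), -1)
-- ===== Notes on version B (the rewrite author's own statement) =====
-- stated objective: alternative
-- what changed: B replaces A's bottom-up 9-slot table with a quadruple nested add-loop by a top-down memoized recursion reach(c) that returns the set of values made from exactly c copies of N, combining sub-levels with set-comprehension unions and finding the answer with a generator expression.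
import Mathlib
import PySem

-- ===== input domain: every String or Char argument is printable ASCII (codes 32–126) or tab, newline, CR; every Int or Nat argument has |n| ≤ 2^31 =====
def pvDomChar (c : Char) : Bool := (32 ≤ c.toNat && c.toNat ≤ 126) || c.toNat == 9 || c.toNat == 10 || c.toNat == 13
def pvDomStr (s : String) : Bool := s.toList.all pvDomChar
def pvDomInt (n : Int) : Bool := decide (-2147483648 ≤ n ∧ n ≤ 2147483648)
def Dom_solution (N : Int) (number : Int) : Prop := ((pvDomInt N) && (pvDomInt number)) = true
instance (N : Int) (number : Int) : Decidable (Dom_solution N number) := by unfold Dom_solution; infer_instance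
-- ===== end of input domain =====

-- B re-decomposes A's bottom-up 9-slot table as a top-down memoized recursion reach(c)
-- (set of values expressible with exactly c copies of N) with comprehension unions; return value only, same answers.
-- Python's sets are hash sets consumed only through membership and set-building (never through their
-- iteration order), so both ports carry them as Std.HashSet Int.

-- int(str(N)*i), shared by both sources; ofChars? = none is Python's ValueError (N < 0, excluded by Pre_)
def pyRep (N : Int) (i : Nat) : Int :=
  (PySem.Int.ofChars? ((List.replicate i (PySem.Int.toChars N)).flatten)).getD 0

-- ===== PORT A =====
-- the four adds of A's innermost loop body
def opsA (s : Std.HashSet Int) (x y : Int) : Std.HashSet Int :=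
  let s := s.insert (x + y)
  let s := s.insert (x - y)
  let s := s.insert (x * y)
  if y ≠ 0 then s.insert (PySem.Int.floordiv x y) else s

-- made[i].add(int(str(N)*i)) then the m/x/y triple loop (made[i] starts empty)
def levelA (N : Int) (made : List (Std.HashSet Int)) (i : Nat) : Std.HashSet Int :=
  (List.range' 1 (i - 1)).foldl
    (fun s m =>
      (made.getD m ∅).toList.foldl
        (fun s x =>
          (made.getD (i - m) ∅).toList.foldl (fun s y => opsA s x y) s)
        s)
    ((∅ : Std.HashSet Int).insert (pyRep N i))

-- for i in range(2,9) with early return; fuel = 9 - i counts the remaining iterations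
def loopA (N : Int) (number : Int) : Nat → Nat → List (Std.HashSet Int) → Int
  | 0, _, _ => -1
  | fuel + 1, i, made =>
    let made := made.set i (levelA N made i)
    if (made.getD i ∅).contains number then (i : Int)
    else loopA N number fuel (i + 1) made

def solution (N : Int) (number : Int) : Int :=
  if number == N then 1
  else
    loopA N number 7 2
      ((List.replicate 9 (∅ : Std.HashSet Int)).set 1 ((∅ : Std.HashSet Int).insert N))

-- ===== PORT B =====
-- reach(c): {N} for c == 1, else seed int(str(N)*c) unioned (|=) with the two comprehensions
-- over reach(m) × reach(c-m); the Python memo dict is a pure cache and is dropped here;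
-- fuel makes the recursion structural (callers keep c - 1 ≤ fuel, where the value is fuel-independent)
def reachB (N : Int) : Nat → Nat → Std.HashSet Int
  | _, 0 => ∅                        -- never requested (c ranges over 1..8)
  | _, 1 => (∅ : Std.HashSet Int).insert N
  | 0, _ + 2 => ∅                    -- out of fuel: never reached from the calls below
  | fuel + 1, c + 2 =>
    (List.range' 1 (c + 1)).foldl
      (fun vals m =>
        let left := (reachB N fuel m).toList
        let right := (reachB N fuel (c + 2 - m)).toList
        let vals := vals.insertMany
          (left.flatMap fun x => right.flatMap fun y => [x + y, x - y, x * y])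
        vals.insertMany
          (left.flatMap fun x =>
            right.filterMap fun y =>
              if y ≠ 0 then some (PySem.Int.floordiv x y) else none))
      ((∅ : Std.HashSet Int).insert (pyRep N (c + 2)))

-- next((c for c in range(2, 9) if number in reach(c)), -1)
def nextB (N : Int) (number : Int) : Nat → Nat → Int
  | 0, _ => -1
  | fuel + 1, c =>
    if (reachB N 8 c).contains number then (c : Int)
    else nextB N number fuel (c + 1)

def solution_alt (N : Int) (number : Int) : Int :=
  if number == N then 1 else nextB N number 7 2

-- ===== PRECONDITION & SPEC =====
-- Pre_ excludes exactly the inputs where A raises ValueError: N < 0 with number ≠ N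
-- (int(str(N)*i) is not a valid int literal for negative N); B raises there too.
def Pre_solution (N : Int) (number : Int) : Prop := 0 ≤ N ∨ number = N
instance (N : Int) (number : Int) : Decidable (Pre_solution N number) := by
  unfold Pre_solution; infer_instance

def pvWitness_solution : Int × Int := (5, 26)

def Spec_solution (N : Int) (number : Int) (out : Int) : Prop := out = solution_alt N number
instance (N : Int) (number : Int) (out : Int) : Decidable (Spec_solution N number out) := by
  unfold Spec_solution; infer_instance

-- ===== CLAIM (what is proved, stated in full; the proofs are below) =====
def Claim_equal_solution : Prop := ∀ (N : Int) (number : Int), Dom_solution N number → Pre_solution N number → Spec_solution N number (solution N number)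

-- ===== LEMMAS AND PROOFS =====

-- the value set contributed by one (x, y) pair in either version
def Combo (x y v : Int) : Prop :=
  x + y = v ∨ x - y = v ∨ x * y = v ∨ (y ≠ 0 ∧ PySem.Int.floordiv x y = v)

theorem mem_opsA (s : Std.HashSet Int) (x y v : Int) :
    v ∈ opsA s x y ↔ v ∈ s ∨ Combo x y v := by
  unfold opsA Combo
  by_cases hy : y = 0 <;> (simp only [hy, ne_eq, not_true_eq_false, not_false_eq_true,
    if_pos, if_neg, Std.HashSet.mem_insert, beq_iff_eq]; tauto)

theorem mem_foldl_sets {α : Type} (xs : List α) (g : Std.HashSet Int → α → Std.HashSet Int)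
    (Q : α → Int → Prop)
    (hg : ∀ s a, a ∈ xs → ∀ v, v ∈ g s a ↔ v ∈ s ∨ Q a v) (s : Std.HashSet Int) (v : Int) :
    v ∈ xs.foldl g s ↔ v ∈ s ∨ ∃ a ∈ xs, Q a v := by
  induction xs generalizing s with
  | nil => simp
  | cons a xs ih =>
    simp only [List.foldl_cons]
    rw [ih (fun s b hb => hg s b (List.mem_cons_of_mem a hb)),
        hg s a (List.mem_cons_self)]
    simp only [List.mem_cons]
    constructor
    · rintro ((h | h) | ⟨b, hb, hQ⟩)
      · exact Or.inl h
      · exact Or.inr ⟨a, Or.inl rfl, h⟩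
      · exact Or.inr ⟨b, Or.inr hb, hQ⟩
    · rintro (h | ⟨b, (rfl | hb), hQ⟩)
      · exact Or.inl (Or.inl h)
      · exact Or.inl (Or.inr hQ)
      · exact Or.inr ⟨b, hb, hQ⟩

theorem mem_levelA (N : Int) (made : List (Std.HashSet Int)) (i : Nat) (v : Int) :
    v ∈ levelA N made i ↔
      pyRep N i = v ∨
        ∃ m ∈ List.range' 1 (i - 1), ∃ x ∈ made.getD m ∅,
          ∃ y ∈ made.getD (i - m) ∅, Combo x y v := by
  unfold levelA
  rw [mem_foldl_sets _ _
        (fun m v => ∃ x ∈ made.getD m ∅, ∃ y ∈ made.getD (i - m) ∅, Combo x y v)]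
  · simp [Std.HashSet.mem_insert]
  · intro s m _ w
    rw [mem_foldl_sets _ _ (fun x v => ∃ y ∈ made.getD (i - m) ∅, Combo x y v)]
    · simp [Std.HashSet.mem_toList]
    · intro s' x _ w'
      rw [mem_foldl_sets _ _ (fun y v => Combo x y v)]
      · simp [Std.HashSet.mem_toList]
      · intro s'' y _ w''
        exact mem_opsA s'' x y w''

theorem mem_reachB_step (N : Int) (fuel c : Nat) (v : Int) :
    v ∈ reachB N (fuel + 1) (c + 2) ↔
      pyRep N (c + 2) = v ∨
        ∃ m ∈ List.range' 1 (c + 1), ∃ x ∈ reachB N fuel m,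
          ∃ y ∈ reachB N fuel (c + 2 - m), Combo x y v := by
  show v ∈ (List.range' 1 (c + 1)).foldl _ _ ↔ _
  rw [mem_foldl_sets _ _
        (fun m v => ∃ x ∈ reachB N fuel m, ∃ y ∈ reachB N fuel (c + 2 - m), Combo x y v)]
  · simp [Std.HashSet.mem_insert]
  · intro s m _ w
    simp only [Std.HashSet.mem_insertMany_list, List.contains_eq_mem, List.mem_flatMap,
      List.mem_filterMap, List.mem_cons, List.not_mem_nil, or_false, decide_eq_true_eq,
      Std.HashSet.mem_toList]
    constructor
    · rintro ((hs | ⟨x, hx, y, hy, h⟩) | ⟨x, hx, y, hy, h⟩)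
      · exact Or.inl hs
      · rcases h with h | h | h
        · exact Or.inr ⟨x, hx, y, hy, Or.inl h.symm⟩
        · exact Or.inr ⟨x, hx, y, hy, Or.inr (Or.inl h.symm)⟩
        · exact Or.inr ⟨x, hx, y, hy, Or.inr (Or.inr (Or.inl h.symm))⟩
      · refine Or.inr ⟨x, hx, y, hy, ?_⟩
        unfold Combo
        by_cases hy0 : y = 0 <;> simp [hy0] at h <;> tauto
    · rintro (hs | ⟨x, hx, y, hy, h⟩)
      · exact Or.inl (Or.inl hs)
      · unfold Combo at h
        rcases h with h | h | h | ⟨hy0, h⟩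
        · exact Or.inl (Or.inr ⟨x, hx, y, hy, Or.inl h.symm⟩)
        · exact Or.inl (Or.inr ⟨x, hx, y, hy, Or.inr (Or.inl h.symm)⟩)
        · exact Or.inl (Or.inr ⟨x, hx, y, hy, Or.inr (Or.inr h.symm)⟩)
        · exact Or.inr ⟨x, hx, y, hy, by simp [hy0, h]⟩

theorem reach_fuel (N : Int) :
    ∀ c f f', c - 1 ≤ f → c - 1 ≤ f' → reachB N f c = reachB N f' c := by
  intro c
  induction c using Nat.strong_induction_on with
  | _ c ih =>
    intro f f' hf hf'
    match c, f, f' with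
    | 0, f, f' => cases f <;> cases f' <;> rfl
    | 1, f, f' => cases f <;> cases f' <;> rfl
    | _ + 2, 0, _ => omega
    | _ + 2, _ + 1, 0 => omega
    | c + 2, f + 1, f' + 1 =>
      show (List.range' 1 (c + 1)).foldl _ _ = (List.range' 1 (c + 1)).foldl _ _
      apply PySem.List.foldl_congr_mem
      intro s m hm
      have hm' := List.mem_range'_1.mp hm
      have h1 : reachB N f m = reachB N f' m :=
        ih m (by omega) f f' (by omega) (by omega)
      have h2 : reachB N f (c + 2 - m) = reachB N f' (c + 2 - m) :=
        ih (c + 2 - m) (by omega) f f' (by omega) (by omega)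
      simp only [h1, h2]

-- canonical characterisation of B's level sets (fuel 8, as solution_alt calls them)
theorem mem_reachB (N : Int) (i : Nat) (h2 : 2 ≤ i) (h8 : i ≤ 8) (v : Int) :
    v ∈ reachB N 8 i ↔
      pyRep N i = v ∨
        ∃ m ∈ List.range' 1 (i - 1), ∃ x ∈ reachB N 8 m,
          ∃ y ∈ reachB N 8 (i - m), Combo x y v := by
  obtain ⟨c, rfl⟩ : ∃ c, i = c + 2 := ⟨i - 2, by omega⟩
  have hstep := mem_reachB_step N 7 c v
  simp only [show (7 : Nat) + 1 = 8 from rfl] at hstep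
  rw [hstep]
  have hr : c + 2 - 1 = c + 1 := by omega
  constructor <;> rintro (h | ⟨m, hm, x, hx, y, hy, hc⟩)
  · exact Or.inl h
  · have hm' := List.mem_range'_1.mp hm
    refine Or.inr ⟨m, by rw [hr]; exact hm, x, ?_, y, ?_, hc⟩
    · rw [reach_fuel N m 8 7 (by omega) (by omega)]; exact hx
    · rw [reach_fuel N (c + 2 - m) 8 7 (by omega) (by omega)]; exact hy
  · exact Or.inl h
  · have hm2 : m ∈ List.range' 1 (c + 1) := by rw [hr] at hm; exact hm
    have hm' := List.mem_range'_1.mp hm2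
    refine Or.inr ⟨m, hm2, x, ?_, y, ?_, hc⟩
    · rw [reach_fuel N m 7 8 (by omega) (by omega)]; exact hx
    · rw [reach_fuel N (c + 2 - m) 7 8 (by omega) (by omega)]; exact hy

-- invariant: the already-filled slots of A's table agree (as sets) with B's reach
def MadeOK (N : Int) (i : Nat) (made : List (Std.HashSet Int)) : Prop :=
  made.length = 9 ∧
    ∀ m, 1 ≤ m → m < i → ∀ v, v ∈ made.getD m ∅ ↔ v ∈ reachB N 8 m

theorem contains_congr (s t : Std.HashSet Int) (x : Int) (h : ∀ v, v ∈ s ↔ v ∈ t) :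
    s.contains x = t.contains x := by
  rw [Bool.eq_iff_iff]
  simp only [← Std.HashSet.mem_iff_contains]
  exact h x

theorem level_eq_reach (N : Int) (i : Nat) (made : List (Std.HashSet Int))
    (h2 : 2 ≤ i) (h8 : i ≤ 8) (hmade : MadeOK N i made) (v : Int) :
    v ∈ levelA N made i ↔ v ∈ reachB N 8 i := by
  rw [mem_levelA, mem_reachB N i h2 h8]
  obtain ⟨-, hm⟩ := hmade
  constructor <;> rintro (h | ⟨m, hmem, x, hx, y, hy, hc⟩)
  · exact Or.inl h
  · have hb := List.mem_range'_1.mp hmem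
    exact Or.inr ⟨m, hmem, x, (hm m (by omega) (by omega) x).mp hx, y,
      (hm (i - m) (by omega) (by omega) y).mp hy, hc⟩
  · exact Or.inl h
  · have hb := List.mem_range'_1.mp hmem
    exact Or.inr ⟨m, hmem, x, (hm m (by omega) (by omega) x).mpr hx, y,
      (hm (i - m) (by omega) (by omega) y).mpr hy, hc⟩

theorem getD_set_self (l : List (Std.HashSet Int)) (i : Nat) (a : Std.HashSet Int)
    (h : i < l.length) : (l.set i a).getD i ∅ = a := by
  simp [List.getD, h]

theorem getD_set_ne (l : List (Std.HashSet Int)) (i m : Nat) (a : Std.HashSet Int)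
    (h : i ≠ m) : (l.set i a).getD m ∅ = l.getD m ∅ := by
  simp [List.getD, List.getElem?_set_ne h]

theorem loop_eq (N number : Int) :
    ∀ fuel i made, fuel + i = 9 → 2 ≤ i → MadeOK N i made →
      loopA N number fuel i made = nextB N number fuel i := by
  intro fuel
  induction fuel with
  | zero => intro i made _ _ _; rfl
  | succ fuel ih =>
    intro i made hfi h2 hmade
    have h8 : i ≤ 8 := by omega
    have hlen : i < made.length := by rw [hmade.1]; omega
    have hset : (made.set i (levelA N made i)).getD i ∅ = levelA N made i :=
      getD_set_self made i _ hlen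
    show (let made' := made.set i (levelA N made i);
      if (made'.getD i ∅).contains number then (i : Int)
      else loopA N number fuel (i + 1) made') = _
    simp only [hset]
    have hcont : (levelA N made i).contains number = (reachB N 8 i).contains number :=
      contains_congr _ _ number (level_eq_reach N i made h2 h8 hmade)
    show (if (levelA N made i).contains number then (i : Int)
      else loopA N number fuel (i + 1) (made.set i (levelA N made i))) = _
    rw [hcont]
    show _ = (if (reachB N 8 i).contains number then (i : Int)
      else nextB N number fuel (i + 1))
    split
    · rfl
    · apply ih (i + 1) _ (by omega) (by omega)
      refine ⟨by simpa using hmade.1, ?_⟩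
      intro m hm1 hmi v
      by_cases hmi' : m = i
      · subst hmi'
        rw [getD_set_self made m _ hlen]
        exact level_eq_reach N m made h2 h8 hmade v
      · rw [getD_set_ne made i m _ (fun h => hmi' h.symm)]
        exact hmade.2 m hm1 (by omega) v

theorem made_init_ok (N : Int) :
    MadeOK N 2 ((List.replicate 9 (∅ : Std.HashSet Int)).set 1
      ((∅ : Std.HashSet Int).insert N)) := by
  constructor
  · simp
  · intro m hm1 hm2 v
    have : m = 1 := by omega
    subst this
    rw [getD_set_self _ 1 _ (by simp)]
    rfl

-- ===== VERDICT (by name: the statement is the Claim_ definition above) =====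
theorem solution_spec : Claim_equal_solution := by
  intro N number _ _
  show solution N number = solution_alt N number
  unfold solution solution_alt
  by_cases h : (number == N) = true
  · rw [if_pos h, if_pos h]
  · rw [if_neg h, if_neg h]
    exact loop_eq N number 7 2 _ rfl (by omega) (made_init_ok N)
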